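-- pv_equiv track=rewrite | github.com/Ashutosh-Tripathy/Online-Hackathon | Google codejam/TeachingAssistant.py | maximum_point_for_case
-- ===== SOURCE A (Python) =====
-- def maximum_point_for_case(S):
--     maximum_point = 0
--     request = []
--     while len(S) > 0:
--         element = S.pop(0)
--         if (len(request) == 0):
--             request.append(element)
--         elif (request[-1] == element):
--             request.pop()
--             maximum_point += 10
--         elif (len(request) < len(S)):
--             request.append(element)
--         else:
--             request.pop()
--             maximum_point += 5
--
--     return maximum_point
-- ===== SOURCE B (Python) =====
-- def maximum_point_for_case(S):
--     # Single forward pass by index (no pop(0)); remaining elements after i is n-1-i.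
--     total = 0
--     stack = []
--     n = len(S)
--     for i, element in enumerate(S):
--         if stack and stack[-1] == element:
--             stack.pop()
--             total += 10
--         elif not stack or len(stack) < n - 1 - i:
--             stack.append(element)
--         else:
--             stack.pop()
--             total += 5
--     return total
-- ===== Notes on version B (the rewrite author's own statement) =====
-- stated objective: faster
-- what changed: Replaced the destructive while-loop that pops from the front of S (each pop(0) is O(n)) by a single non-mutating indexed pass computing the remaining count as n-1-i, and reordered the branch tests around the stack emptiness check.
import Mathlib
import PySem

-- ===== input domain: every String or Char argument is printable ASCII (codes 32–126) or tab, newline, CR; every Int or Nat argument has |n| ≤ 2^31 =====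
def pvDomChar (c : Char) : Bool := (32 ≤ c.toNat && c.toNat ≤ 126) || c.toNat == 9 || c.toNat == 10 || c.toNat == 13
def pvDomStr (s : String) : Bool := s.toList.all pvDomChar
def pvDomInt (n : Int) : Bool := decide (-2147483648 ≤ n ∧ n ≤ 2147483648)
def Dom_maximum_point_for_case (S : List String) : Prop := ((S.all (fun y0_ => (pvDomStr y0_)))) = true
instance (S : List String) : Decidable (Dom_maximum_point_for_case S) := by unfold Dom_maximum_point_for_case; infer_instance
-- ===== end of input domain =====

-- B replaces A's destructive pop(0) front-loop (O(n^2)) by one indexed pass with remaining = n-1-i (O(n)).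
-- Python A empties its argument list S in place; the equivalence proved here is about the RETURN value only.

-- ===== PORT A =====
-- A's while-loop: pops the head of S each step; 'request' is a stack (Python appends/pops
-- at the end; ported with the top of the stack at the HEAD of the list, which is exact for
-- the operations used: append, request[-1], pop()).  len(S) in the comparison is the length
-- of the list AFTER the pop, i.e. of the tail.
def mpLoopA : List String → List String → Int → Int
  | [], _, maximum_point => maximum_point
  | element :: rest, request, maximum_point =>
    match request with
    | [] => mpLoopA rest [element] maximum_point
    | top :: rs =>
      if top = element then mpLoopA rest rs (maximum_point + 10)
      else if ((top :: rs).length : Int) < (rest.length : Int) then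
        mpLoopA rest (element :: top :: rs) maximum_point
      else mpLoopA rest rs (maximum_point + 5)

def maximum_point_for_case (S : List String) : Int := mpLoopA S [] 0

-- ===== PORT B =====
-- B's for-loop over enumerate(S): a foldl over PySem.List.enumerate, state = (stack, total);
-- the stack's top is at the head (same exact representation of Python's end-of-list stack).
def mpStepB (n : Int) (st : List String × Int) (p : Int × String) : List String × Int :=
  match st, p with
  | (stack, total), (i, element) =>
    match stack with
    | top :: stk =>
      if top = element then (stk, total + 10)
      else if ((top :: stk).length : Int) < n - 1 - i then (element :: top :: stk, total)
      else (stk, total + 5)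
    | [] => ([element], total)

def maximum_point_for_case_alt (S : List String) : Int :=
  ((PySem.List.enumerate S).foldl (mpStepB (S.length : Int)) ([], 0)).2

-- ===== PRECONDITION & SPEC =====
def Spec_maximum_point_for_case (S : List String) (out : Int) : Prop := out = maximum_point_for_case_alt S
instance (S : List String) (out : Int) : Decidable (Spec_maximum_point_for_case S out) := by unfold Spec_maximum_point_for_case; infer_instance

-- ===== CLAIM (what is proved, stated in full; the proofs are below) =====
def Claim_equal_maximum_point_for_case : Prop := ∀ (S : List String), Dom_maximum_point_for_case S → Spec_maximum_point_for_case S (maximum_point_for_case S)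

-- ===== LEMMAS AND PROOFS =====

-- Invariant: when B is about to process position i, A is about to process the tail xs,
-- and n - i = xs.length; then the two loops agree from identical (stack, total) state.
theorem mpLoop_agree (n : Int) :
    ∀ (xs : List String) (i : Int) (stack : List String) (total : Int),
      n - i = (xs.length : Int) →
      ((PySem.List.enumerate xs i).foldl (mpStepB n) (stack, total)).2
        = mpLoopA xs stack total := by
  intro xs
  induction xs with
  | nil => intro i stack total _; simp [PySem.List.enumerate, mpLoopA]
  | cons e rest ih =>
    intro i stack total hn
    have hrest : n - (i + 1) = (rest.length : Int) := by
      simp at hn; omega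
    have hrem : n - 1 - i = (rest.length : Int) := by omega
    rw [PySem.List.enumerate_cons, List.foldl_cons]
    match stack with
    | [] => simp [mpStepB, mpLoopA, ih _ _ _ hrest]
    | top :: stk =>
      simp only [mpStepB, mpLoopA, hrem]
      split_ifs <;> simp [ih _ _ _ hrest]

-- ===== VERDICT (by name: the statement is the Claim_ definition above) =====
theorem maximum_point_for_case_spec : Claim_equal_maximum_point_for_case := by
  intro S _
  unfold Spec_maximum_point_for_case maximum_point_for_case maximum_point_for_case_alt
  exact (mpLoop_agree (S.length : Int) S 0 [] 0 (by simp)).symm
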